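-- pv_equiv track=rewrite | github.com/YernarBekbolat/deep-ml-my-solutions | Linear Algebra/Easy/Implement Compressed Column Sparse Matrix Format (CSC)/solution1.py | compressed_col_sparse_matrix
-- ===== SOURCE A (Python) =====
-- def compressed_col_sparse_matrix(dense_matrix):
-- 	"""
-- 	Convert a dense matrix into its Compressed Column Sparse (CSC) representation.
--
-- 	:param dense_matrix: List of lists representing the dense matrix
-- 	:return: Tuple of (values, row indices, column pointer)
-- 	"""
-- 	vals = []
-- 	row_idx = []
-- 	col_ptr = [0]
--
-- 	num_rows = len(dense_matrix)
-- 	num_cols = len(dense_matrix[0])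
--
-- 	for col_index in range(num_cols):
-- 		for row_index in range(num_rows):
-- 			if dense_matrix[row_index][col_index] != 0:
-- 				vals.append(dense_matrix[row_index][col_index])
-- 				row_idx.append(row_index)
-- 		col_ptr.append(len(vals))
--
-- 	return vals, row_idx, col_ptr
-- ===== SOURCE B (Python) =====
-- def compressed_col_sparse_matrix(dense_matrix):
--     """Row-major single pass into per-column buckets held in a dict, then one
--     concatenation pass with a running total for the column pointer."""
--     num_cols = len(dense_matrix[0])
--     buckets = {}
--     for r, row in enumerate(dense_matrix):
--         for c in range(num_cols):
--             if row[c] != 0: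
--                 buckets.setdefault(c, []).append((row[c], r))
--     vals = []
--     row_idx = []
--     col_ptr = [0]
--     total = 0
--     for c in range(num_cols):
--         b = buckets.get(c, [])
--         for v, r in b:
--             vals.append(v)
--             row_idx.append(r)
--         total += len(b)
--         col_ptr.append(total)
--     return vals, row_idx, col_ptr
-- ===== Notes on version B (the rewrite author's own statement) =====
-- stated objective: alternative
-- what changed: A scans the dense matrix column-major with nested index loops; B makes one row-major pass that groups nonzero entries into per-column buckets held in a dict, then assembles vals/row_idx by concatenating buckets in column order with a running total for col_ptr.
import Mathlib
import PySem

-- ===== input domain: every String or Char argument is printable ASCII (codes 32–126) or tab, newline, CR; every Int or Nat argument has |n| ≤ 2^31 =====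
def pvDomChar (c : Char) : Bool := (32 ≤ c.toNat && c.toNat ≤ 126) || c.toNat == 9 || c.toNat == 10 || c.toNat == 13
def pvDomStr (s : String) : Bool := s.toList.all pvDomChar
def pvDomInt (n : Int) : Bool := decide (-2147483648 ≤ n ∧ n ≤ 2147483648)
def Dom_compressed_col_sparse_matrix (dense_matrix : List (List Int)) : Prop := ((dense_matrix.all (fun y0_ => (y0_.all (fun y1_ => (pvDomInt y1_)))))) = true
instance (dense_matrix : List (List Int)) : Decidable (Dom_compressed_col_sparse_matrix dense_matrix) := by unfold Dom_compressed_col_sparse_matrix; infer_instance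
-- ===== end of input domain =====

-- B replaces A's column-major double scan of the dense matrix by a single row-major
-- pass that groups nonzero entries into per-column buckets (a dict), then one
-- concatenation pass with a running total for the column pointer (objective: alternative).

-- ===== PORT A =====
def compressed_col_sparse_matrix (dense_matrix : List (List Int)) : List Int × List Int × List Int :=
  let num_rows : Int := dense_matrix.length
  let num_cols : Int := (PySem.List.pyGetD dense_matrix 0 []).length
  (PySem.List.pyRange 0 num_cols).foldl
    (fun (st : List Int × List Int × List Int) col_index =>
      let inner := (PySem.List.pyRange 0 num_rows).foldl
        (fun (p : List Int × List Int) row_index =>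
          if PySem.List.pyGetD (PySem.List.pyGetD dense_matrix row_index []) col_index 0 ≠ 0 then
            (p.1 ++ [PySem.List.pyGetD (PySem.List.pyGetD dense_matrix row_index []) col_index 0],
             p.2 ++ [row_index])
          else p)
        (st.1, st.2.1)
      (inner.1, inner.2, st.2.2 ++ [(inner.1.length : Int)]))
    ([], [], [0])

-- ===== PORT B =====
def compressed_col_sparse_matrix_alt (dense_matrix : List (List Int)) : List Int × List Int × List Int :=
  let num_cols : Int := (PySem.List.pyGetD dense_matrix 0 []).length
  let buckets : PySem.Dict Int (List (Int × Int)) :=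
    (PySem.List.enumerate dense_matrix).foldl
      (fun d rr =>
        (PySem.List.pyRange 0 num_cols).foldl
          (fun d c =>
            if PySem.List.pyGetD rr.2 c 0 ≠ 0 then
              d.modify c [] (fun b => b ++ [(PySem.List.pyGetD rr.2 c 0, rr.1)])
            else d)
          d)
      PySem.Dict.empty
  let st := (PySem.List.pyRange 0 num_cols).foldl
    (fun (st : List Int × List Int × Int × List Int) c =>
      let b := buckets.getD c []
      let p := b.foldl (fun (p : List Int × List Int) vr => (p.1 ++ [vr.1], p.2 ++ [vr.2])) (st.1, st.2.1)
      let total : Int := st.2.2.1 + (b.length : Int)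
      (p.1, p.2, total, st.2.2.2 ++ [total]))
    ([], [], 0, [0])
  (st.1, st.2.1, st.2.2.2)

-- ===== PRECONDITION & SPEC =====
-- Pre_ excludes exactly the inputs on which the Python A raises IndexError:
-- the empty matrix (dense_matrix[0]) and ragged matrices with a row shorter than row 0.
def Pre_compressed_col_sparse_matrix (dense_matrix : List (List Int)) : Prop :=
  dense_matrix ≠ [] ∧ ∀ row ∈ dense_matrix, dense_matrix.headI.length ≤ row.length
instance (dense_matrix : List (List Int)) : Decidable (Pre_compressed_col_sparse_matrix dense_matrix) := by
  unfold Pre_compressed_col_sparse_matrix; infer_instance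

def pvWitness_compressed_col_sparse_matrix : List (List Int) := [[1, 0, 3], [0, 2, 0]]

def Spec_compressed_col_sparse_matrix (dense_matrix : List (List Int)) (out : List Int × List Int × List Int) : Prop := out = compressed_col_sparse_matrix_alt dense_matrix
instance (dense_matrix : List (List Int)) (out : List Int × List Int × List Int) : Decidable (Spec_compressed_col_sparse_matrix dense_matrix out) := by unfold Spec_compressed_col_sparse_matrix; infer_instance

-- ===== CLAIM (what is proved, stated in full; the proofs are below) =====
def Claim_equal_compressed_col_sparse_matrix : Prop := ∀ (dense_matrix : List (List Int)), Dom_compressed_col_sparse_matrix dense_matrix → Pre_compressed_col_sparse_matrix dense_matrix → Spec_compressed_col_sparse_matrix dense_matrix (compressed_col_sparse_matrix dense_matrix)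

-- ===== LEMMAS AND PROOFS =====

-- The nonzero entries of column c, with their row indices, in row order.
def colPairs (m : List (List Int)) (c : Int) : List (Int × Int) :=
  (PySem.List.enumerate m).filterMap
    (fun rr => if PySem.List.pyGetD rr.2 c 0 ≠ 0 then some (PySem.List.pyGetD rr.2 c 0, rr.1) else none)

-- Canonical outputs after the first n columns.
def canonV (m : List (List Int)) (n : Nat) : List Int :=
  ((List.range n).map (fun k => (colPairs m (k : Int)).map Prod.fst)).flatten
def canonR (m : List (List Int)) (n : Nat) : List Int :=
  ((List.range n).map (fun k => (colPairs m (k : Int)).map Prod.snd)).flatten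
def canonP (m : List (List Int)) (n : Nat) : List Int :=
  (List.range (n + 1)).map (fun j => ((canonV m j).length : Int))

theorem canonV_succ (m : List (List Int)) (n : Nat) :
    canonV m (n + 1) = canonV m n ++ (colPairs m (n : Int)).map Prod.fst := by
  simp [canonV, List.range_succ]
theorem canonR_succ (m : List (List Int)) (n : Nat) :
    canonR m (n + 1) = canonR m n ++ (colPairs m (n : Int)).map Prod.snd := by
  simp [canonR, List.range_succ]
theorem canonP_succ (m : List (List Int)) (n : Nat) :
    canonP m (n + 1) = canonP m n ++ [((canonV m (n + 1)).length : Int)] := by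
  simp [canonP, List.range_succ]

-- ---- A side ----

-- A's inner row loop appends exactly the column's nonzero values and row indices.
theorem innerA (m : List (List Int)) (c : Int) (l : List Int) (vs rs : List Int) :
    l.foldl
      (fun (p : List Int × List Int) i =>
        if PySem.List.pyGetD (PySem.List.pyGetD m i []) c 0 ≠ 0 then
          (p.1 ++ [PySem.List.pyGetD (PySem.List.pyGetD m i []) c 0], p.2 ++ [i])
        else p)
      (vs, rs)
    = (vs ++ (l.filterMap (fun i =>
          if PySem.List.pyGetD (PySem.List.pyGetD m i []) c 0 ≠ 0 then
            some (PySem.List.pyGetD (PySem.List.pyGetD m i []) c 0, i)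
          else none)).map Prod.fst,
       rs ++ (l.filterMap (fun i =>
          if PySem.List.pyGetD (PySem.List.pyGetD m i []) c 0 ≠ 0 then
            some (PySem.List.pyGetD (PySem.List.pyGetD m i []) c 0, i)
          else none)).map Prod.snd) := by
  induction l generalizing vs rs with
  | nil => simp
  | cons i l ih =>
    by_cases h : PySem.List.pyGetD (PySem.List.pyGetD m i []) c 0 ≠ 0
    · simp only [List.foldl_cons, List.filterMap_cons, if_pos h, ih]
      simp
    · simp only [List.foldl_cons, List.filterMap_cons, if_neg h, ih]

-- The filterMap over row indices is colPairs.
theorem filterMap_range_eq_colPairs (m : List (List Int)) (c : Int) :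
    (PySem.List.pyRange 0 (m.length : Int)).filterMap (fun i =>
        if PySem.List.pyGetD (PySem.List.pyGetD m i []) c 0 ≠ 0 then
          some (PySem.List.pyGetD (PySem.List.pyGetD m i []) c 0, i)
        else none)
    = colPairs m c := by
  rw [colPairs, PySem.List.enumerate_eq_map_pyRange m ([] : List Int), List.filterMap_map]
  simp [PySem.List.len, Function.comp]

-- ---- B side: the dict of buckets ----

-- One row's inner loop over the columns: effect on one key.
theorem dictInner (row : List Int) (r : Int) (l : List Int) (hl : l.Nodup)
    (d : PySem.Dict Int (List (Int × Int))) (c : Int) :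
    (l.foldl
        (fun d c' =>
          if PySem.List.pyGetD row c' 0 ≠ 0 then
            d.modify c' [] (fun b => b ++ [(PySem.List.pyGetD row c' 0, r)])
          else d)
        d).getD c []
    = d.getD c [] ++
        (if c ∈ l ∧ PySem.List.pyGetD row c 0 ≠ 0 then [(PySem.List.pyGetD row c 0, r)] else []) := by
  induction l generalizing d with
  | nil => simp
  | cons c' l ih =>
    rcases List.nodup_cons.mp hl with ⟨hc', hl'⟩
    simp only [List.foldl_cons]
    by_cases hv : PySem.List.pyGetD row c' 0 ≠ 0
    · rw [if_pos hv, ih hl', PySem.Dict.getD_modify]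
      by_cases hcc : c = c'
      · subst hcc
        have : c ∉ l := hc'
        simp [this, hv]
      · simp [hcc, List.mem_cons]
    · rw [if_neg hv, ih hl']
      by_cases hcc : c = c'
      · subst hcc
        simp [hv]
      · simp [hcc, List.mem_cons]

-- The whole row loop: each in-range key holds exactly its column's nonzero pairs.
theorem dictOuter (ncols : Int) (l : List (Int × List Int))
    (d : PySem.Dict Int (List (Int × Int))) (c : Int) (hc : c ∈ PySem.List.pyRange 0 ncols) :
    (l.foldl
        (fun d rr =>
          (PySem.List.pyRange 0 ncols).foldl
            (fun d c' =>
              if PySem.List.pyGetD rr.2 c' 0 ≠ 0 then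
                d.modify c' [] (fun b => b ++ [(PySem.List.pyGetD rr.2 c' 0, rr.1)])
              else d)
            d)
        d).getD c []
    = d.getD c [] ++
        l.filterMap (fun rr =>
          if PySem.List.pyGetD rr.2 c 0 ≠ 0 then some (PySem.List.pyGetD rr.2 c 0, rr.1) else none) := by
  induction l generalizing d with
  | nil => simp
  | cons rr l ih =>
    simp only [List.foldl_cons, List.filterMap_cons]
    rw [ih, dictInner rr.2 rr.1 _ (PySem.List.nodup_pyRange_one 0 ncols) d c]
    by_cases hv : PySem.List.pyGetD rr.2 c 0 ≠ 0
    · simp [hc, hv]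
    · simp [hv]

-- ---- the two output-assembly loops ----

-- B's flattening of one bucket.
theorem innerB (b : List (Int × Int)) (vs rs : List Int) :
    b.foldl (fun (p : List Int × List Int) vr => (p.1 ++ [vr.1], p.2 ++ [vr.2])) (vs, rs)
    = (vs ++ b.map Prod.fst, rs ++ b.map Prod.snd) := by
  induction b generalizing vs rs with
  | nil => simp
  | cons vr b ih => simp [ih]

-- A's outer loop over the first n columns.
theorem outerA (m : List (List Int)) (n : Nat) :
    (PySem.List.pyRange 0 (n : Int)).foldl
      (fun (st : List Int × List Int × List Int) col_index =>
        let inner := (PySem.List.pyRange 0 (m.length : Int)).foldl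
          (fun (p : List Int × List Int) row_index =>
            if PySem.List.pyGetD (PySem.List.pyGetD m row_index []) col_index 0 ≠ 0 then
              (p.1 ++ [PySem.List.pyGetD (PySem.List.pyGetD m row_index []) col_index 0],
               p.2 ++ [row_index])
            else p)
          (st.1, st.2.1)
        (inner.1, inner.2, st.2.2 ++ [(inner.1.length : Int)]))
      ([], [], [0])
    = (canonV m n, canonR m n, canonP m n) := by
  induction n with
  | zero => simp [canonV, canonR, canonP, PySem.List.pyRange_one_eq_nil]
  | succ n ih =>
    have hcast : ((n + 1 : Nat) : Int) = (n : Int) + 1 := by push_cast; ring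
    rw [hcast, PySem.List.pyRange_one_succ_right (by positivity), List.foldl_append, ih]
    simp only [List.foldl_cons, List.foldl_nil]
    rw [innerA, filterMap_range_eq_colPairs]
    rw [canonV_succ, canonR_succ, canonP_succ, canonV_succ]

-- B's assembly loop over the first n columns (g c gives bucket c's pairs).
theorem outerB (m : List (List Int)) (g : Int → List (Int × Int))
    (hg : ∀ k : Nat, k < ((PySem.List.pyGetD m 0 []).length) → g (k : Int) = colPairs m (k : Int))
    (n : Nat) (hn : n ≤ (PySem.List.pyGetD m 0 []).length) :
    (PySem.List.pyRange 0 (n : Int)).foldl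
      (fun (st : List Int × List Int × Int × List Int) c =>
        let b := g c
        let p := b.foldl (fun (p : List Int × List Int) vr => (p.1 ++ [vr.1], p.2 ++ [vr.2])) (st.1, st.2.1)
        let total : Int := st.2.2.1 + (b.length : Int)
        (p.1, p.2, total, st.2.2.2 ++ [total]))
      ([], [], 0, [0])
    = (canonV m n, canonR m n, ((canonV m n).length : Int), canonP m n) := by
  induction n with
  | zero => simp [canonV, canonR, canonP, PySem.List.pyRange_one_eq_nil]
  | succ n ih =>
    have hcast : ((n + 1 : Nat) : Int) = (n : Int) + 1 := by push_cast; ring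
    rw [hcast, PySem.List.pyRange_one_succ_right (by positivity), List.foldl_append,
      ih (Nat.le_of_succ_le hn)]
    simp only [List.foldl_cons, List.foldl_nil]
    rw [hg n (Nat.lt_of_succ_le hn), innerB]
    rw [canonV_succ, canonR_succ, canonP_succ, canonV_succ]
    simp

-- ===== VERDICT (by name: the statement is the Claim_ definition above) =====
theorem compressed_col_sparse_matrix_spec : Claim_equal_compressed_col_sparse_matrix := by
  intro m _ _
  unfold Spec_compressed_col_sparse_matrix compressed_col_sparse_matrix compressed_col_sparse_matrix_alt
  simp only []
  rw [outerA m ((PySem.List.pyGetD m 0 []).length)]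
  rw [outerB m (fun c => (((PySem.List.enumerate m).foldl
        (fun d rr =>
          (PySem.List.pyRange 0 ((PySem.List.pyGetD m 0 []).length : Int)).foldl
            (fun d c' =>
              if PySem.List.pyGetD rr.2 c' 0 ≠ 0 then
                d.modify c' [] (fun b => b ++ [(PySem.List.pyGetD rr.2 c' 0, rr.1)])
              else d)
            d)
        PySem.Dict.empty).getD c []))
    (fun k hk => by
      simp only []
      rw [dictOuter _ _ _ _ (PySem.List.mem_pyRange_one.mpr ⟨Int.natCast_nonneg k, by exact_mod_cast hk⟩)]
      simp [colPairs, PySem.Dict.getD_empty])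
    ((PySem.List.pyGetD m 0 []).length) le_rfl]
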